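-- pv_equiv track=rewrite | github.com/LisiiTr/BalatroGrupo5 | combinaciones.py | fullHouse
-- ===== SOURCE A (Python) =====
-- def fullHouse(valores): #se evalúa la jugada fullhouse
--     cantPares = []
--     cantTrios = []
--     valores_unicos = set(valores)
--
--     for v in valores_unicos:
--         if valores.count(v) == 3:
--             cantTrios.append(v)
--         if valores.count(v) == 2:
--             cantPares.append(v)
--
--     if len(cantTrios) == 1 and len(cantPares) == 1:
--         return True
--     else:
--         return False
-- ===== SOURCE B (Python) =====
-- def fullHouse(valores):
--     vs = sorted(valores)
--     if not vs:
--         return False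
--     trios = 0
--     pares = 0
--     cur = vs[0]
--     run = 1
--     for v in vs[1:]:
--         if v == cur:
--             run += 1
--         else:
--             if run == 3:
--                 trios += 1
--             elif run == 2:
--                 pares += 1
--             cur = v
--             run = 1
--     if run == 3:
--         trios += 1
--     elif run == 2:
--         pares += 1
--     return trios == 1 and pares == 1
-- ===== Notes on version B (the rewrite author's own statement) =====
-- stated objective: faster
-- what changed: replaces A's per-distinct-value .count scans over a set with sort-then-single-pass run-length grouping that tallies maximal runs of length 3 and 2
import Mathlib
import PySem

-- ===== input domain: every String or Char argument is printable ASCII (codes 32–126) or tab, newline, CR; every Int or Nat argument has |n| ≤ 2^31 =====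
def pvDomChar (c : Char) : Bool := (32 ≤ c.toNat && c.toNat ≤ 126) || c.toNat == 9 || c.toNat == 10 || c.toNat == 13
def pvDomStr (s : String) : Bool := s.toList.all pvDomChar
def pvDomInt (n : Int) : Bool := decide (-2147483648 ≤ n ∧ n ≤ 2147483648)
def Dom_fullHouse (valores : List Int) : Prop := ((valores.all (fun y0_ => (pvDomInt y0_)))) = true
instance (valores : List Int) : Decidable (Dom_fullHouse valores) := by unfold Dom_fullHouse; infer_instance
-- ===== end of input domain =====

-- B sorts a copy of the hand and tallies maximal runs of equal values in one pass,
-- replacing A's per-distinct-value .count scans over set(valores).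

-- ===== PORT A =====
-- state: (cantPares, cantTrios); iteration over set(valores) — the result depends
-- only on the multiset of distinct elements, not on Python's hash order.
def fullHouse (valores : List Int) : Bool :=
  let valoresUnicos := PySem.Set.ofList valores
  let st := valoresUnicos.foldl (fun (st : List Int × List Int) v =>
      let st := if PySem.List.count valores v = 3 then (st.1, st.2 ++ [v]) else st
      if PySem.List.count valores v = 2 then (st.1 ++ [v], st.2) else st) ([], [])
  if st.2.length = 1 ∧ st.1.length = 1 then true else false

-- ===== PORT B =====
-- closing a completed run of length r: bump trios on r = 3, pares on r = 2
def fhClose (r t p : Int) : Int × Int :=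
  if r = 3 then (t + 1, p) else if r = 2 then (t, p + 1) else (t, p)

-- loop body: state (cur, run, trios, pares)
def fhStep (st : Int × Int × Int × Int) (v : Int) : Int × Int × Int × Int :=
  if v = st.1 then (st.1, st.2.1 + 1, st.2.2.1, st.2.2.2)
  else
    let tp := fhClose st.2.1 st.2.2.1 st.2.2.2
    (v, 1, tp.1, tp.2)

def fullHouse_alt (valores : List Int) : Bool :=
  let vs := PySem.List.sorted valores (fun x => x) false
  if vs.isEmpty then false
  else
    let st := (vs.drop 1).foldl fhStep (vs.head!, 1, 0, 0)
    let tp := fhClose st.2.1 st.2.2.1 st.2.2.2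
    decide (tp.1 = 1 ∧ tp.2 = 1)

-- ===== PRECONDITION & SPEC =====
def Spec_fullHouse (valores : List Int) (out : Bool) : Prop := out = fullHouse_alt valores
instance (valores : List Int) (out : Bool) : Decidable (Spec_fullHouse valores out) := by unfold Spec_fullHouse; infer_instance

-- ===== CLAIM (what is proved, stated in full; the proofs are below) =====
def Claim_equal_fullHouse : Prop := ∀ (valores : List Int), Dom_fullHouse valores → Spec_fullHouse valores (fullHouse valores)

-- ===== LEMMAS AND PROOFS =====

-- run tally of a list by repeatedly stripping the head's occurrences (proof-side model of B's scan)
def runTally : List Int → Int × Int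
  | [] => (0, 0)
  | y :: ys =>
    let rest := runTally (ys.filter (· ≠ y))
    ((if (ys.count y : Int) + 1 = 3 then rest.1 + 1 else rest.1),
     (if (ys.count y : Int) + 1 = 2 then rest.2 + 1 else rest.2))
termination_by l => l.length
decreasing_by
  simp
  exact (List.length_filter_le _ _).trans (by simp)

-- A's accumulation over any iteration list S appends the matching values to each component
theorem fullHouse_foldA (valores S : List Int) (st : List Int × List Int) :
    S.foldl (fun (st : List Int × List Int) v =>
      let st := if PySem.List.count valores v = 3 then (st.1, st.2 ++ [v]) else st
      if PySem.List.count valores v = 2 then (st.1 ++ [v], st.2) else st) st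
    = (st.1 ++ S.filter (fun v => PySem.List.count valores v = 2),
       st.2 ++ S.filter (fun v => PySem.List.count valores v = 3)) := by
  induction S generalizing st with
  | nil => simp
  | cons x xs ih =>
    rw [List.foldl_cons, ih]
    by_cases h3 : PySem.List.count valores x = 3
    · have h2 : ¬ PySem.List.count valores x = 2 := by omega
      rw [PySem.List.count_eq] at h3 h2
      simp [PySem.List.count_eq, h3]
    · by_cases h2 : PySem.List.count valores x = 2 <;>
        rw [PySem.List.count_eq] at h3 h2 <;>
        simp [PySem.List.count_eq, h3, h2]

-- B's scan over a sorted tail: closing the final run gives the run tally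
theorem fullHouse_scan (L : List Int) : ∀ (cur r t p : Int),
    (cur :: L).Pairwise (· ≤ ·) →
    (fun st : Int × Int × Int × Int => fhClose st.2.1 st.2.2.1 st.2.2.2)
      (L.foldl fhStep (cur, r, t, p))
    = ((fhClose (r + (L.count cur : Int)) t p).1 + (runTally (L.filter (· ≠ cur))).1,
       (fhClose (r + (L.count cur : Int)) t p).2 + (runTally (L.filter (· ≠ cur))).2) := by
  induction L with
  | nil =>
    intro cur r t p _
    simp only [List.foldl_nil, List.filter_nil, List.count_nil]
    rw [runTally]
    simp [fhClose]
  | cons y ys ih =>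
    intro cur r t p hpw
    by_cases hy : y = cur
    · subst hy
      rw [List.foldl_cons]
      have hstep : fhStep (y, r, t, p) y = (y, r + 1, t, p) := by simp [fhStep]
      rw [hstep]
      have hpw' : (y :: ys).Pairwise (· ≤ ·) := by
        rcases List.pairwise_cons.mp hpw with ⟨_, h2⟩
        exact h2
      rw [ih y (r + 1) t p hpw']
      simp
      constructor <;> · congr 2; ring
    · have hcy : cur ≤ y := (List.pairwise_cons.mp hpw).1 y (by simp)
      have hys : ∀ z ∈ ys, y ≤ z := by
        have := (List.pairwise_cons.mp hpw).2
        exact (List.pairwise_cons.mp this).1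
      have hcur_notin : cur ∉ y :: ys := by
        intro hmem
        rcases List.mem_cons.mp hmem with h | h
        · exact hy h.symm
        · have := hys cur h; omega
      rw [List.foldl_cons]
      have hstep : fhStep (cur, r, t, p) y
          = (y, 1, (fhClose r t p).1, (fhClose r t p).2) := by
        simp [fhStep, hy]
      rw [hstep]
      have hpw' : (y :: ys).Pairwise (· ≤ ·) := (List.pairwise_cons.mp hpw).2
      rw [ih y 1 (fhClose r t p).1 (fhClose r t p).2 hpw']
      have hcount0 : (y :: ys).count cur = 0 := List.count_eq_zero.mpr hcur_notin
      have hfilter : (y :: ys).filter (· ≠ cur) = y :: ys :=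
        List.filter_eq_self.mpr (fun z hz => by
          simp only [ne_eq, decide_eq_true_eq]
          intro h; exact hcur_notin (h ▸ hz))
      rw [hcount0, hfilter]
      show _ = ((fhClose (r + 0) t p).1 + (runTally (y :: ys)).1,
                (fhClose (r + 0) t p).2 + (runTally (y :: ys)).2)
      rw [runTally]
      simp only [fhClose, add_zero]
      split_ifs <;> simp <;> omega

-- the run tally counts the distinct values of multiplicity 3 resp. 2
theorem runTally_count (L : List Int) :
    runTally L = (((PySem.Set.ofList L).countP (fun v => L.count v = 3) : Int),
                  ((PySem.Set.ofList L).countP (fun v => L.count v = 2) : Int)) := by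
  induction hL : L.length using Nat.strong_induction_on generalizing L with
  | _ n ih =>
    match L with
    | [] => rw [runTally]; simp [PySem.Set.ofList]
    | y :: ys =>
      have hlen : (ys.filter (· ≠ y)).length < n := by
        have := List.length_filter_le (· ≠ y) ys
        simp at hL; omega
      have IH := ih _ hlen (ys.filter (· ≠ y)) rfl
      -- replace Set.ofList (y::ys) by the nodup list y :: Set.ofList (filter (≠ y) ys)
      have hperm : List.Perm (PySem.Set.ofList (y :: ys)) (y :: PySem.Set.ofList (ys.filter (· ≠ y))) := by
        apply (List.perm_ext_iff_of_nodup (PySem.Set.nodup_ofList _) ?_).mpr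
        · intro a
          simp only [PySem.Set.mem_ofList, List.mem_cons, List.mem_filter, ne_eq,
            decide_eq_true_eq]
          constructor
          · rintro (h | h)
            · exact Or.inl h
            · by_cases ha : a = y
              · exact Or.inl ha
              · exact Or.inr ⟨h, ha⟩
          · rintro (h | ⟨h, _⟩)
            · exact Or.inl h
            · exact Or.inr h
        · refine List.nodup_cons.mpr ⟨?_, PySem.Set.nodup_ofList _⟩
          simp [PySem.Set.mem_ofList, List.mem_filter]
      have hcP3 := hperm.countP_eq (fun v => decide ((y :: ys).count v = 3))
      have hcP2 := hperm.countP_eq (fun v => decide ((y :: ys).count v = 2))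
      rw [runTally, IH]
      have hhead : ∀ k, (y :: ys).count y = k ↔ ys.count y + 1 = k := by
        intro k; rw [List.count_cons_self]
      have hrest : ∀ m : Nat, (PySem.Set.ofList (ys.filter (· ≠ y))).countP
            (fun v => (y :: ys).count v = m)
          = (PySem.Set.ofList (ys.filter (· ≠ y))).countP
            (fun v => (ys.filter (· ≠ y)).count v = m) := by
        intro m
        apply List.countP_congr
        intro v hv
        have hvmem : v ∈ ys.filter (· ≠ y) := (PySem.Set.mem_ofList _ _).mp hv
        have hvne : v ≠ y := by
          have := (List.mem_filter.mp hvmem).2; simpa using this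
        have hc : (y :: ys).count v = (ys.filter (· ≠ y)).count v := by
          rw [List.count_cons_of_ne (Ne.symm hvne), List.count_filter]
          simp [hvne]
        simp [hc]
      simp only [hcP3, hcP2, List.countP_cons, hrest]
      simp only [List.count_cons_self]
      by_cases h3 : ys.count y + 1 = 3
      · have h2 : ¬ ys.count y + 1 = 2 := by omega
        simp [h3]
        constructor <;> omega
      · by_cases h2 : ys.count y + 1 = 2 <;>
          · simp [h3, h2]
            constructor <;> omega

-- ===== VERDICT (by name: the statement is the Claim_ definition above) =====
theorem fullHouse_spec : Claim_equal_fullHouse := by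
  intro valores _
  show fullHouse valores = fullHouse_alt valores
  simp only [fullHouse]
  rw [fullHouse_foldA]
  simp only [List.nil_append, ← List.countP_eq_length_filter, PySem.List.count_eq]
  rcases hs : PySem.List.sorted valores (fun x => x) false with _ | ⟨x, xs⟩
  · have hnil : valores = [] := (PySem.List.sorted_eq_nil_iff valores (fun x => x) false).mp hs
    subst hnil
    have : fullHouse_alt [] = false := by decide
    rw [this]
    decide
  · have hB : fullHouse_alt valores
        = decide ((fhClose ((xs.foldl fhStep (x, 1, 0, 0)).2.1)
              ((xs.foldl fhStep (x, 1, 0, 0)).2.2.1) ((xs.foldl fhStep (x, 1, 0, 0)).2.2.2)).1 = 1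
            ∧ (fhClose ((xs.foldl fhStep (x, 1, 0, 0)).2.1)
              ((xs.foldl fhStep (x, 1, 0, 0)).2.2.1) ((xs.foldl fhStep (x, 1, 0, 0)).2.2.2)).2 = 1) := by
      unfold fullHouse_alt
      rw [hs]
      rfl
    rw [hB]
    have hperm : List.Perm (x :: xs) valores := hs ▸ PySem.List.sorted_perm valores (fun x => x) false
    have hpw : (x :: xs).Pairwise (· ≤ ·) := by
      have h := PySem.List.sorted_pairwise valores (fun x : Int => x)
      rw [hs] at h
      exact h
    have hscan := fullHouse_scan xs x 1 0 0 hpw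
    simp only at hscan
    rw [show (fhClose ((xs.foldl fhStep (x, 1, 0, 0)).2.1) ((xs.foldl fhStep (x, 1, 0, 0)).2.2.1)
          ((xs.foldl fhStep (x, 1, 0, 0)).2.2.2))
        = ((fhClose (1 + (xs.count x : Int)) 0 0).1 + (runTally (xs.filter (· ≠ x))).1,
           (fhClose (1 + (xs.count x : Int)) 0 0).2 + (runTally (xs.filter (· ≠ x))).2) from hscan]
    have hrt : ((fhClose (1 + (xs.count x : Int)) 0 0).1 + (runTally (xs.filter (· ≠ x))).1,
                (fhClose (1 + (xs.count x : Int)) 0 0).2 + (runTally (xs.filter (· ≠ x))).2)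
        = runTally (x :: xs) := by
      rw [runTally]
      simp only [fhClose]
      split_ifs with a b c d <;> simp <;> omega
    have hcnt : ∀ v, (x :: xs).count v = valores.count v := fun v => hperm.count_eq v
    have hset : List.Perm (PySem.Set.ofList (x :: xs)) (PySem.Set.ofList valores) := by
      apply (List.perm_ext_iff_of_nodup (PySem.Set.nodup_ofList _) (PySem.Set.nodup_ofList _)).mpr
      intro a
      simp only [PySem.Set.mem_ofList]
      exact ⟨fun h => hperm.mem_iff.mp h, fun h => hperm.mem_iff.mpr h⟩
    have key3 : (PySem.Set.ofList (x :: xs)).countP (fun v => (x :: xs).count v = 3)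
        = (PySem.Set.ofList valores).countP (fun v => valores.count v = 3) := by
      rw [hset.countP_eq]
      exact List.countP_congr (fun v _ => by simp [hcnt v])
    have key2 : (PySem.Set.ofList (x :: xs)).countP (fun v => (x :: xs).count v = 2)
        = (PySem.Set.ofList valores).countP (fun v => valores.count v = 2) := by
      rw [hset.countP_eq]
      exact List.countP_congr (fun v _ => by simp [hcnt v])
    have hmain : (runTally (x :: xs)).1
        = ((PySem.Set.ofList valores).countP (fun v => valores.count v = 3) : Int) ∧
        (runTally (x :: xs)).2
        = ((PySem.Set.ofList valores).countP (fun v => valores.count v = 2) : Int) := by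
      rw [runTally_count]
      exact ⟨by rw [key3], by rw [key2]⟩
    rw [congrArg Prod.fst hrt, congrArg Prod.snd hrt, hmain.1, hmain.2]
    by_cases c3 : (PySem.Set.ofList valores).countP (fun v => valores.count v = 3) = 1 <;>
      by_cases c2 : (PySem.Set.ofList valores).countP (fun v => valores.count v = 2) = 1 <;>
        simp [c3, c2] <;> tauto
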